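-- pv_equiv track=rewrite | github.com/stipsitzm/OpenFarmPlanner | backend/farm/services/enrichment_helpers/sources.py | render_sources_markdown
-- ===== SOURCE A (Python) =====
-- def render_sources_markdown(structured_sources: list[dict[str, str]]) -> str:
--     """Render structured sources into a markdown sources section."""
--     if not structured_sources:
--         return ''
--
--     variety = [s for s in structured_sources if s.get('type') == 'variety_specific']
--     general = [s for s in structured_sources if s.get('type') == 'general_crop']
--
--     lines = ["## Quellen"]
--     if variety:
--         lines.append("### Sortenspezifische Quellen")
--         for src in variety:
--             lines.append(f"- [{src['title']}]({src['url']})")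
--     if general:
--         lines.append("### Allgemeine Kulturinformationen")
--         for src in general:
--             lines.append(f"- [{src['title']}]({src['url']})")
--     return "\n".join(lines).strip()
-- ===== SOURCE B (Python) =====
-- def render_sources_markdown(structured_sources: list[dict[str, str]]) -> str:
--     """Render structured sources into a markdown sources section."""
--     if not structured_sources:
--         return ''
--
--     # single pass: accumulate each section's body directly as a string
--     variety_body = ''
--     general_body = ''
--     for s in structured_sources:
--         t = s.get('type')
--         if t == 'variety_specific':
--             variety_body += f"\n- [{s['title']}]({s['url']})"
--         elif t == 'general_crop':
--             general_body += f"\n- [{s['title']}]({s['url']})"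
--
--     out = "## Quellen"
--     if variety_body:
--         out += "\n### Sortenspezifische Quellen" + variety_body
--     if general_body:
--         out += "\n### Allgemeine Kulturinformationen" + general_body
--     # no join/strip needed: the result never starts or ends with whitespace
--     return out
-- ===== Notes on version B (the rewrite author's own statement) =====
-- stated objective: alternative
-- what changed: B replaces A's two filter passes plus line-list/join/strip pipeline with a single pass over the sources that accumulates each section's body directly as a string, then assembles the result by conditional string concatenation with no intermediate list, no join and no strip.
import Mathlib
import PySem

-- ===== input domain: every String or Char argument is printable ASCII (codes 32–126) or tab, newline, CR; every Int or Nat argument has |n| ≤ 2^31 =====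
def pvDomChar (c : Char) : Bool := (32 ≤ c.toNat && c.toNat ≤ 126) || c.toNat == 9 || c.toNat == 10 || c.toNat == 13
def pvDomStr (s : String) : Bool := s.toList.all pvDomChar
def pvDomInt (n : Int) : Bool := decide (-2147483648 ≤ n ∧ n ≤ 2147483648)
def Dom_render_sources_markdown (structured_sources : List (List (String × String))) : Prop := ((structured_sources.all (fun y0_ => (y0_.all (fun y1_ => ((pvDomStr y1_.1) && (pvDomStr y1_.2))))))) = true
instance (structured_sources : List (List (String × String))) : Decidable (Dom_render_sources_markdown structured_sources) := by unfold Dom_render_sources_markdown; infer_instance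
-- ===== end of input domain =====

-- B replaces A's two filter passes + line-list/join/strip pipeline with a single pass that
-- accumulates each section's body directly as a string; objective: alternative decomposition.


-- ===== PORT A =====
-- shared literal translation of the f-string  f"- [{src['title']}]({src['url']})"
-- (on Pre_ inputs both lookups are `some`; the `getD ""` is never the value used there)
def pvFmt (src : List (String × String)) : String :=
  "- [" ++ ((PySem.Dict.mk src).get? "title").getD "" ++ "](" ++ ((PySem.Dict.mk src).get? "url").getD "" ++ ")"

def render_sources_markdown (structured_sources : List (List (String × String))) : String :=
  if structured_sources = [] then "" else
  let variety := structured_sources.filter (fun s => (PySem.Dict.mk s).get? "type" == some "variety_specific")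
  let general := structured_sources.filter (fun s => (PySem.Dict.mk s).get? "type" == some "general_crop")
  let lines : List String := ["## Quellen"]
  let lines := if variety ≠ [] then
      variety.foldl (fun ls src => ls ++ [pvFmt src]) (lines ++ ["### Sortenspezifische Quellen"])
    else lines
  let lines := if general ≠ [] then
      general.foldl (fun ls src => ls ++ [pvFmt src]) (lines ++ ["### Allgemeine Kulturinformationen"])
    else lines
  PySem.Str.strip (PySem.Str.join "\n" lines)

-- ===== PORT B =====
def render_sources_markdown_alt (structured_sources : List (List (String × String))) : String :=
  if structured_sources = [] then "" else
  -- single pass: accumulate each section's body directly as a string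
  let p := structured_sources.foldl (fun (p : String × String) s =>
      let t := (PySem.Dict.mk s).get? "type"
      if t == some "variety_specific" then (p.1 ++ ("\n" ++ pvFmt s), p.2)
      else if t == some "general_crop" then (p.1, p.2 ++ ("\n" ++ pvFmt s))
      else p) ("", "")
  let out := "## Quellen"
  let out := if p.1 ≠ "" then out ++ ("\n### Sortenspezifische Quellen" ++ p.1) else out
  let out := if p.2 ≠ "" then out ++ ("\n### Allgemeine Kulturinformationen" ++ p.2) else out
  out

-- ===== PRECONDITION & SPEC =====
-- Pre_ excludes exactly the inputs on which Python A raises KeyError: a source whose type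
-- matches a section ('variety_specific' or 'general_crop') but lacks a 'title' or 'url' key.
def Pre_render_sources_markdown (structured_sources : List (List (String × String))) : Prop :=
  ∀ s ∈ structured_sources,
    ((PySem.Dict.mk s).get? "type" = some "variety_specific" ∨
     (PySem.Dict.mk s).get? "type" = some "general_crop") →
    ((PySem.Dict.mk s).get? "title").isSome ∧ ((PySem.Dict.mk s).get? "url").isSome
instance (structured_sources : List (List (String × String))) : Decidable (Pre_render_sources_markdown structured_sources) := by unfold Pre_render_sources_markdown; infer_instance

def pvWitness_render_sources_markdown : (List (List (String × String))) :=
  [[("type", "variety_specific"), ("title", "T1"), ("url", "http://a")],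
   [("type", "general_crop"), ("title", "T2"), ("url", "http://b")],
   [("title", "no type")]]

def Spec_render_sources_markdown (structured_sources : List (List (String × String))) (out : String) : Prop := out = render_sources_markdown_alt structured_sources
instance (structured_sources : List (List (String × String))) (out : String) : Decidable (Spec_render_sources_markdown structured_sources out) := by unfold Spec_render_sources_markdown; infer_instance

-- ===== CLAIM (what is proved, stated in full; the proofs are below) =====
def Claim_equal_render_sources_markdown : Prop := ∀ (structured_sources : List (List (String × String))), Dom_render_sources_markdown structured_sources → Pre_render_sources_markdown structured_sources → Spec_render_sources_markdown structured_sources (render_sources_markdown structured_sources)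

-- ===== LEMMAS AND PROOFS =====

-- one markdown line per source, preceded by the separating newline
def pvChunk (s : List (String × String)) : List Char := '\n' :: (pvFmt s).toList

-- A's for-loop appending one rendered line per source is the map appended
theorem pv_foldl_append (l : List (List (String × String))) (acc : List String) :
    l.foldl (fun ls src => ls ++ [pvFmt src]) acc = acc ++ l.map pvFmt := by
  induction l generalizing acc with
  | nil => simp
  | cons x xs ih => simp [List.foldl_cons, ih, List.append_assoc]

-- joining with "\n" = head ++ the newline-prefixed chunks of the tail
theorem pv_join_cons (rest : List (List Char)) (x : List Char) :
    PySem.Chars.join ['\n'] (x :: rest) = x ++ rest.flatMap (fun y => '\n' :: y) := by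
  induction rest generalizing x with
  | nil => simp [PySem.Chars.join_singleton]
  | cons y r ih => simp [PySem.Chars.join_cons_cons, ih, List.append_assoc]

-- B's single-pass fold computes, per component, the concatenated chunks of each filtered sublist
theorem pv_foldB (xs : List (List (String × String))) (a b : String) :
    (xs.foldl (fun (p : String × String) s =>
      let t := (PySem.Dict.mk s).get? "type"
      if t == some "variety_specific" then (p.1 ++ ("\n" ++ pvFmt s), p.2)
      else if t == some "general_crop" then (p.1, p.2 ++ ("\n" ++ pvFmt s))
      else p) (a, b)).1.toList
      = a.toList ++ (xs.filter (fun s => (PySem.Dict.mk s).get? "type" == some "variety_specific")).flatMap pvChunk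
    ∧ (xs.foldl (fun (p : String × String) s =>
      let t := (PySem.Dict.mk s).get? "type"
      if t == some "variety_specific" then (p.1 ++ ("\n" ++ pvFmt s), p.2)
      else if t == some "general_crop" then (p.1, p.2 ++ ("\n" ++ pvFmt s))
      else p) (a, b)).2.toList
      = b.toList ++ (xs.filter (fun s => (PySem.Dict.mk s).get? "type" == some "general_crop")).flatMap pvChunk := by
  induction xs generalizing a b with
  | nil => simp
  | cons x t ih =>
      by_cases hv : (PySem.Dict.mk x).get? "type" = some "variety_specific"
      · obtain ⟨i1, i2⟩ := ih (a ++ ("\n" ++ pvFmt x)) b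
        simp only [beq_iff_eq, String.toList_append,
          show ("\n" : String).toList = ['\n'] from rfl] at i1 i2 ⊢
        simp [hv, pvChunk, List.append_assoc, i1, i2]
      · by_cases hg : (PySem.Dict.mk x).get? "type" = some "general_crop"
        · obtain ⟨i1, i2⟩ := ih a (b ++ ("\n" ++ pvFmt x))
          simp only [beq_iff_eq, String.toList_append,
            show ("\n" : String).toList = ['\n'] from rfl] at i1 i2 ⊢
          simp [hv, hg, pvChunk, List.append_assoc, i1, i2]
        · obtain ⟨i1, i2⟩ := ih a b
          simp only [beq_iff_eq] at i1 i2 ⊢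
          simp [hv, hg, i1, i2]

theorem pv_flatMap_nil_iff (l : List (List (String × String))) :
    l.flatMap pvChunk = [] ↔ l = [] := by
  cases l with
  | nil => simp
  | cons x t => simp [pvChunk]

theorem pv_fmt_getLast (s : List (String × String)) :
    ((pvFmt s).toList).getLast? = some ')' := by
  have h : (pvFmt s).toList
      = ("- [" ++ ((PySem.Dict.mk s).get? "title").getD "" ++ "]("
          ++ ((PySem.Dict.mk s).get? "url").getD "").toList ++ [')'] := by
    simp [pvFmt]
  rw [h, List.getLast?_concat]

theorem pv_flatMap_getLast (l : List (List (String × String))) (h : l ≠ []) :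
    (l.flatMap pvChunk).getLast? = some ')' := by
  induction l with
  | nil => exact absurd rfl h
  | cons x t ih =>
      cases t with
      | nil =>
          simp only [List.flatMap_cons, List.flatMap_nil, List.append_nil, pvChunk]
          rw [show ('\n' :: (pvFmt x).toList) = ['\n'] ++ (pvFmt x).toList from rfl,
            List.getLast?_append_of_ne_nil]
          · exact pv_fmt_getLast x
          · simp [pvFmt]
      | cons y r =>
          rw [List.flatMap_cons, List.getLast?_append_of_ne_nil]
          · exact ih (by simp)
          · intro habs
            simp [pvChunk] at habs

theorem pv_flatMap_lines (l : List (List (String × String))) :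
    (List.map (String.toList ∘ pvFmt) l).flatMap (fun y => '\n' :: y) = l.flatMap pvChunk := by
  induction l with
  | nil => rfl
  | cons x t ih => simp [pvChunk, ih]

theorem pv_strip_noop (l : List Char) (c : Char)
    (hlast : l.getLast? = some c) (hc : PySem.Chars.isspace c = false)
    (hhead : ∃ t, l = '#' :: t) :
    PySem.Chars.strip l = l := by
  obtain ⟨t, rfl⟩ := hhead
  obtain ⟨l', hl'⟩ := List.getLast?_eq_some_iff.mp hlast
  unfold PySem.Chars.strip PySem.Chars.lstrip PySem.Chars.rstrip
  rw [List.dropWhile_cons_of_neg (by simp [show PySem.Chars.isspace '#' = false from rfl]),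
    hl', List.reverse_append]
  simp [hc]

-- ===== VERDICT (by name: the statement is the Claim_ definition above) =====
theorem pv_strip_flat (pre : List Char) (l : List (List (String × String))) (hl : ¬ l = [])
    (hpre : ∃ t, pre = '#' :: t) :
    PySem.Chars.strip (pre ++ l.flatMap pvChunk) = pre ++ l.flatMap pvChunk := by
  apply pv_strip_noop _ ')'
  · rw [List.getLast?_append_of_ne_nil _ (fun e => hl ((pv_flatMap_nil_iff l).mp e))]
    exact pv_flatMap_getLast l hl
  · rfl
  · obtain ⟨t, rfl⟩ := hpre; exact ⟨_, rfl⟩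

theorem render_sources_markdown_spec : Claim_equal_render_sources_markdown := by
  intro xs _ _
  unfold Spec_render_sources_markdown render_sources_markdown render_sources_markdown_alt
  by_cases h : xs = []
  · simp [h]
  · obtain ⟨i1, i2⟩ := pv_foldB xs "" ""
    refine String.toList_inj.mp ?_
    simp only [h, if_false, pv_foldl_append, ne_eq, ← String.toList_eq_nil_iff, i1, i2,
      List.nil_append, pv_flatMap_nil_iff]
    by_cases hV : xs.filter (fun s => (PySem.Dict.mk s).get? "type" == some "variety_specific") = [] <;>
      by_cases hG : xs.filter (fun s => (PySem.Dict.mk s).get? "type" == some "general_crop") = []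
    · simp only [hV, hG, not_true, eq_self_iff_true, if_false, ite_false, if_neg, not_false_iff]
      simp [hV, hG]
      decide
    · simp only [show ("" : String).toList = [] from rfl, List.nil_append, List.flatMap_nil,
        pv_flatMap_nil_iff, hV, hG, not_false_iff, ite_true, ite_false, eq_self_iff_true, not_true]
      rw [PySem.Str.toList_strip, PySem.Str.toList_join]
      simp only [List.map_append, List.map_cons, List.map_nil, List.map_map, List.nil_append,
        List.cons_append, List.singleton_append]
      rw [show ("\n" : String).toList = ['\n'] from rfl, pv_join_cons, List.flatMap_cons,
        pv_flatMap_lines, ← List.append_assoc]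
      rw [pv_strip_flat ("## Quellen".toList ++ '\n' :: "### Allgemeine Kulturinformationen".toList) _ hG ⟨"# Quellen".toList ++ '\n' :: "### Allgemeine Kulturinformationen".toList, by decide⟩]
      rw [String.toList_append, String.toList_append, i2]
      simp
    · simp only [show ("" : String).toList = [] from rfl, List.nil_append, List.flatMap_nil,
        pv_flatMap_nil_iff, hV, hG, not_false_iff, ite_true, ite_false, eq_self_iff_true, not_true]
      rw [PySem.Str.toList_strip, PySem.Str.toList_join]
      simp only [List.map_append, List.map_cons, List.map_nil, List.map_map, List.nil_append,
        List.cons_append, List.singleton_append]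
      rw [show ("\n" : String).toList = ['\n'] from rfl, pv_join_cons, List.flatMap_cons,
        pv_flatMap_lines, ← List.append_assoc]
      rw [pv_strip_flat ("## Quellen".toList ++ '\n' :: "### Sortenspezifische Quellen".toList) _ hV ⟨"# Quellen".toList ++ '\n' :: "### Sortenspezifische Quellen".toList, by decide⟩]
      rw [String.toList_append, String.toList_append, i1]
      simp
    · simp only [show ("" : String).toList = [] from rfl, List.nil_append, List.flatMap_nil,
        pv_flatMap_nil_iff, hV, hG, not_false_iff, ite_true, ite_false, eq_self_iff_true, not_true]
      rw [PySem.Str.toList_strip, PySem.Str.toList_join]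
      simp only [List.map_append, List.map_cons, List.map_nil, List.map_map, List.nil_append,
        List.cons_append, List.singleton_append]
      rw [show ("\n" : String).toList = ['\n'] from rfl, pv_join_cons, List.flatMap_cons,
        List.flatMap_append, List.flatMap_append, pv_flatMap_lines, pv_flatMap_lines]
      simp only [List.flatMap_cons, List.flatMap_nil, List.append_nil]
      simp only [← List.append_assoc]
      rw [pv_strip_flat ((("## Quellen".toList ++ '\n' :: "### Sortenspezifische Quellen".toList) ++
            List.flatMap pvChunk (List.filter (fun s => (PySem.Dict.mk s).get? "type" == some "variety_specific") xs)) ++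
            '\n' :: "### Allgemeine Kulturinformationen".toList) _ hG
        ⟨"# Quellen".toList ++ '\n' :: "### Sortenspezifische Quellen".toList ++
            List.flatMap pvChunk (List.filter (fun s => (PySem.Dict.mk s).get? "type" == some "variety_specific") xs) ++
            '\n' :: "### Allgemeine Kulturinformationen".toList, by simp⟩]
      simp only [String.toList_append, i1, i2]
      simp
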